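-- pv_equiv track=rewrite | github.com/NamithNayakK/Cloud-based-Resume-analyzer | backend/mlService/app.py | build_improvement_plan
-- ===== SOURCE A (Python) =====
-- def build_improvement_plan(issues: list, extracted: dict):
--     plan = []
--     if any("Contact details" in issue for issue in issues):
--         plan.append("Add your name, phone number, and email at the top in a clean header.")
--     if any("measurable impact" in issue for issue in issues):
--         plan.append("Rewrite project bullets with numbers, percentages, or business outcomes.")
--     if any("action verbs" in issue for issue in issues):
--         plan.append("Use strong verbs such as built, automated, reduced, shipped, and improved.")
--     if any("short" in issue for issue in issues):
--         plan.append("Expand the resume with projects, internships, or case studies." )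
--     if len(extracted.get("skills", [])) < 3:
--         plan.append("Add a focused skills section with tools, frameworks, and domain keywords.")
--     if not extracted.get("education"):
--         plan.append("Include your education section or relevant certifications if available.")
--     if not plan:
--         plan.append("Polish the summary and keep only role-relevant achievements.")
--
--     return plan[:6]
-- ===== SOURCE B (Python) =====
-- _SUBS = ("Contact details", "measurable impact", "action verbs", "short")
-- _ADVICE = (
--     "Add your name, phone number, and email at the top in a clean header.",
--     "Rewrite project bullets with numbers, percentages, or business outcomes.",
--     "Use strong verbs such as built, automated, reduced, shipped, and improved.",
--     "Expand the resume with projects, internships, or case studies.",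
--     "Add a focused skills section with tools, frameworks, and domain keywords.",
--     "Include your education section or relevant certifications if available.",
-- )
-- _FALLBACK = "Polish the summary and keep only role-relevant achievements."
--
-- def build_improvement_plan(issues: list, extracted: dict):
--     # one pass over issues, collecting a flag per trigger substring
--     hits = [False, False, False, False]
--     for issue in issues:
--         hits = [h or (sub in issue) for h, sub in zip(hits, _SUBS)]
--     hits.append(len(extracted.get("skills", [])) < 3)
--     hits.append(not extracted.get("education"))
--     # table-driven emission: advice whose flag is set, in table order
--     plan = [msg for h, msg in zip(hits, _ADVICE) if h]
--     return plan or [_FALLBACK]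
-- ===== Notes on version B (the rewrite author's own statement) =====
-- stated objective: simpler
-- what changed: B replaces A's four separate any(...) scans, six sequential append branches and the plan[:6] slice with one pass over issues that fills a flag vector, then a table-driven zip-comprehension over (flag, advice) pairs with a 'plan or [fallback]' return.
import Mathlib
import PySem

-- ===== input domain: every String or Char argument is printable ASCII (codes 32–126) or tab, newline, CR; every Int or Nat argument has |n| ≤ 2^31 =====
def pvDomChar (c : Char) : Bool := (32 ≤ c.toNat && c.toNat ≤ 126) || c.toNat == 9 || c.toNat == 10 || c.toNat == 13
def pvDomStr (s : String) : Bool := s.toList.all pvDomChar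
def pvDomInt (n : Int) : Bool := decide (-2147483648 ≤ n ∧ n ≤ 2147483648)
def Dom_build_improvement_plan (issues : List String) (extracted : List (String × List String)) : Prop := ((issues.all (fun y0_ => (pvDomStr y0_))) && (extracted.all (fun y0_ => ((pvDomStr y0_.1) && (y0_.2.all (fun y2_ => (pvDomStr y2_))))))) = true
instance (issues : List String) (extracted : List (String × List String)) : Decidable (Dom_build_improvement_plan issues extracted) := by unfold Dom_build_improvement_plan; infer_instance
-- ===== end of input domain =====

-- B replaces A's four separate any(...) scans, six append branches and the plan[:6] slice with
-- one flag-collecting pass over issues plus a table-driven emission ('simpler'); same outputs.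

-- shared helper: Python truthiness of extracted.get("education") (None or empty list is falsy); exact
def pvFalsy (o : Option (List String)) : Bool :=
  match o with
  | none => true
  | some l => l.isEmpty

-- ===== PORT A =====
def build_improvement_plan (issues : List String) (extracted : List (String × List String)) : List String :=
  let d := PySem.Dict.mk extracted
  let plan : List String := []
  let plan := if issues.any (fun issue => PySem.Str.isIn "Contact details" issue) then
      plan ++ ["Add your name, phone number, and email at the top in a clean header."] else plan
  let plan := if issues.any (fun issue => PySem.Str.isIn "measurable impact" issue) then
      plan ++ ["Rewrite project bullets with numbers, percentages, or business outcomes."] else plan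
  let plan := if issues.any (fun issue => PySem.Str.isIn "action verbs" issue) then
      plan ++ ["Use strong verbs such as built, automated, reduced, shipped, and improved."] else plan
  let plan := if issues.any (fun issue => PySem.Str.isIn "short" issue) then
      plan ++ ["Expand the resume with projects, internships, or case studies."] else plan
  let plan := if (d.getD "skills" []).length < 3 then
      plan ++ ["Add a focused skills section with tools, frameworks, and domain keywords."] else plan
  let plan := if pvFalsy (d.get? "education") then
      plan ++ ["Include your education section or relevant certifications if available."] else plan
  let plan := if plan.isEmpty then
      plan ++ ["Polish the summary and keep only role-relevant achievements."] else plan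
  PySem.List.slice plan none (some 6)

-- ===== PORT B =====
def pvSubs : List String := ["Contact details", "measurable impact", "action verbs", "short"]
def pvAdvice : List String :=
  ["Add your name, phone number, and email at the top in a clean header.",
   "Rewrite project bullets with numbers, percentages, or business outcomes.",
   "Use strong verbs such as built, automated, reduced, shipped, and improved.",
   "Expand the resume with projects, internships, or case studies.",
   "Add a focused skills section with tools, frameworks, and domain keywords.",
   "Include your education section or relevant certifications if available."]
def pvFallback : String := "Polish the summary and keep only role-relevant achievements."

def build_improvement_plan_alt (issues : List String) (extracted : List (String × List String)) : List String :=
  let d := PySem.Dict.mk extracted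
  let hits := issues.foldl
      (fun hits issue => (hits.zip pvSubs).map (fun p => p.1 || PySem.Str.isIn p.2 issue))
      [false, false, false, false]
  let hits := hits ++ [decide ((d.getD "skills" []).length < 3), pvFalsy (d.get? "education")]
  let plan := (hits.zip pvAdvice).filterMap (fun p => if p.1 then some p.2 else none)
  if plan.isEmpty then [pvFallback] else plan

-- ===== PRECONDITION & SPEC =====
def Spec_build_improvement_plan (issues : List String) (extracted : List (String × List String)) (out : List String) : Prop := out = build_improvement_plan_alt issues extracted
instance (issues : List String) (extracted : List (String × List String)) (out : List String) : Decidable (Spec_build_improvement_plan issues extracted out) := by unfold Spec_build_improvement_plan; infer_instance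

-- ===== CLAIM (what is proved, stated in full; the proofs are below) =====
def Claim_equal_build_improvement_plan : Prop := ∀ (issues : List String) (extracted : List (String × List String)), Dom_build_improvement_plan issues extracted → Spec_build_improvement_plan issues extracted (build_improvement_plan issues extracted)

-- ===== LEMMAS AND PROOFS =====

-- B's single pass computes exactly the four any(...) scans of A
theorem hits_fold (issues : List String) (b1 b2 b3 b4 : Bool) :
    issues.foldl
      (fun hits issue => (hits.zip pvSubs).map (fun p => p.1 || PySem.Str.isIn p.2 issue))
      [b1, b2, b3, b4]
    = [b1 || issues.any (fun issue => PySem.Str.isIn "Contact details" issue),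
       b2 || issues.any (fun issue => PySem.Str.isIn "measurable impact" issue),
       b3 || issues.any (fun issue => PySem.Str.isIn "action verbs" issue),
       b4 || issues.any (fun issue => PySem.Str.isIn "short" issue)] := by
  induction issues generalizing b1 b2 b3 b4 with
  | nil => simp
  | cons i t ih =>
      rw [List.foldl_cons]
      have h : (([b1, b2, b3, b4].zip pvSubs).map (fun p => p.1 || PySem.Str.isIn p.2 i))
          = [b1 || PySem.Str.isIn "Contact details" i,
             b2 || PySem.Str.isIn "measurable impact" i,
             b3 || PySem.Str.isIn "action verbs" i,
             b4 || PySem.Str.isIn "short" i] := rfl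
      rw [h, ih]
      simp [List.any_cons, Bool.or_assoc]

-- ===== VERDICT (by name: the statement is the Claim_ definition above) =====
theorem build_improvement_plan_spec : Claim_equal_build_improvement_plan := by
  intro issues extracted _
  show build_improvement_plan issues extracted = build_improvement_plan_alt issues extracted
  unfold build_improvement_plan build_improvement_plan_alt
  simp only [hits_fold, Bool.false_or]
  generalize issues.any (fun issue => PySem.Str.isIn "Contact details" issue) = b1
  generalize issues.any (fun issue => PySem.Str.isIn "measurable impact" issue) = b2
  generalize issues.any (fun issue => PySem.Str.isIn "action verbs" issue) = b3
  generalize issues.any (fun issue => PySem.Str.isIn "short" issue) = b4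
  generalize pvFalsy ((PySem.Dict.mk extracted).get? "education") = b6
  by_cases h5 : ((PySem.Dict.mk extracted).getD "skills" []).length < 3 <;>
    [simp only [if_pos h5, decide_eq_true h5]; simp only [if_neg h5, decide_eq_false h5]] <;>
    revert b1 b2 b3 b4 b6 <;> decide
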